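-- pv_equiv track=rewrite | github.com/su-arch/SWArch | 5200_flask_app/address_generator.py | collapse_fields_to_schema
-- ===== SOURCE A (Python) =====
-- FIELD_POOL = {'Building Number',
--                'Floor',
--                'County',
--                'Street 1',
--                'City',
--                'Postcode',
--                'Province',
--                'Post Office Code',
--                'Building Name',
--                'Block',
--                'District',
--                'Country',
--                'State',
--                'Apt Number',
--                'House'}
--
-- def collapse_fields_to_schema(full_address):
--     collapsed_schema = {'apt':'', 'street1':'', 'street2':'',
--                         'postcode': '', 'district':'', 'city':'', 'county':'', 'state':'', 'country':''}
--     all_fields = {field : '' for field in FIELD_POOL}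
--     for field in all_fields:
--         if field in full_address.keys():
--             all_fields[field] = str(full_address[field])
--
--     collapsed_schema['apt'] = '' + (all_fields['House']) + all_fields['Apt Number']
--     collapsed_schema['street1'] = all_fields['Street 1'] + all_fields['Block']
--     collapsed_schema['street2'] = all_fields['Building Name'] + all_fields['Building Number'] + all_fields['Floor']
--     collapsed_schema['postcode'] = all_fields['Postcode']
--     collapsed_schema['city'] = all_fields['City'] + all_fields['Post Office Code']
--     collapsed_schema['district'] = all_fields['District']
--     collapsed_schema['county'] = all_fields['District']
--     collapsed_schema['state'] = all_fields['State'] + all_fields['Province']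
--     collapsed_schema['country'] = all_fields['Country']
--     return(collapsed_schema)
-- ===== SOURCE B (Python) =====
-- # Table-driven: one spec of (output key, ordered source fields), built in a single pass.
-- SCHEMA_SPEC = [
--     ('apt', ['House', 'Apt Number']),
--     ('street1', ['Street 1', 'Block']),
--     ('street2', ['Building Name', 'Building Number', 'Floor']),
--     ('postcode', ['Postcode']),
--     ('district', ['District']),
--     ('city', ['City', 'Post Office Code']),
--     ('county', ['District']),
--     ('state', ['State', 'Province']),
--     ('country', ['Country']),
-- ]
--
-- def _join_fields(full_address, sources):
--     value = ''
--     for s in sources: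
--         value += str(full_address[s]) if s in full_address else ''
--     return value
--
-- def collapse_fields_to_schema(full_address):
--     collapsed = {}
--     for key, sources in SCHEMA_SPEC:
--         collapsed[key] = _join_fields(full_address, sources)
--     return collapsed
-- ===== Notes on version B (the rewrite author's own statement) =====
-- stated objective: simpler
-- what changed: Replaced the FIELD_POOL defaults dict plus populate-then-assign passes by a single table-driven pass over a spec mapping each output key to its ordered source fields (keeping the county=District quirk).
import Mathlib
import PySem

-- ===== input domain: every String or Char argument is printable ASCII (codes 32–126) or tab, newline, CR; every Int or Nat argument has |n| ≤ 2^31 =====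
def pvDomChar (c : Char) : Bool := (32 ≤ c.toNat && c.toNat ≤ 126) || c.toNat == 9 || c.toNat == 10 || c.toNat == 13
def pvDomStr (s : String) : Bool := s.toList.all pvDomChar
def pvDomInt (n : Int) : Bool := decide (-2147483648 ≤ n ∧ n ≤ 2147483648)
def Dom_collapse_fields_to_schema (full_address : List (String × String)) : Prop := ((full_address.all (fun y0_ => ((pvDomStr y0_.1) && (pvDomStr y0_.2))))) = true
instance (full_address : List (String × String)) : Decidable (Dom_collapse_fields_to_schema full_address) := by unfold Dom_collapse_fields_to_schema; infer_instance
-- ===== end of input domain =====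

-- B replaces A's FIELD_POOL-defaults dict and populate-then-assign passes by one
-- table-driven pass over a (key, source fields) spec; same return value (objective: simpler).

-- ===== PORT A =====
-- FIELD_POOL (a Python set literal; iteration order does not affect the result, all values are set to the same '')
def pvFieldPool : List String :=
  ["Building Number", "Floor", "County", "Street 1", "City", "Postcode", "Province",
   "Post Office Code", "Building Name", "Block", "District", "Country", "State", "Apt Number", "House"]

-- all_fields = {field : '' for field in FIELD_POOL}
def pvAllFieldsInit : PySem.Dict String String :=
  pvFieldPool.foldl (fun m f => m.insert f "") PySem.Dict.empty

def collapse_fields_to_schema (full_address : List (String × String)) : List (String × String) :=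
  let collapsed0 : PySem.Dict String String := PySem.Dict.ofList
    [("apt", ""), ("street1", ""), ("street2", ""), ("postcode", ""), ("district", ""),
     ("city", ""), ("county", ""), ("state", ""), ("country", "")]
  let d := PySem.Dict.mk full_address
  -- for field in all_fields: if field in full_address.keys(): all_fields[field] = str(full_address[field])
  let all_fields := pvAllFieldsInit.keys.foldl
    (fun m f => if d.contains f then m.insert f (d.getD f "") else m) pvAllFieldsInit
  let g := fun f => all_fields.getD f ""
  ((((((((((collapsed0.insert "apt" ("" ++ g "House" ++ g "Apt Number")
   ).insert "street1" (g "Street 1" ++ g "Block")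
   ).insert "street2" (g "Building Name" ++ g "Building Number" ++ g "Floor")
   ).insert "postcode" (g "Postcode")
   ).insert "city" (g "City" ++ g "Post Office Code")
   ).insert "district" (g "District")
   ).insert "county" (g "District")
   ).insert "state" (g "State" ++ g "Province")
   ).insert "country" (g "Country")
   ).items)

-- ===== PORT B =====
def pvSchemaSpec : List (String × List String) :=
  [("apt", ["House", "Apt Number"]),
   ("street1", ["Street 1", "Block"]),
   ("street2", ["Building Name", "Building Number", "Floor"]),
   ("postcode", ["Postcode"]),
   ("district", ["District"]),
   ("city", ["City", "Post Office Code"]),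
   ("county", ["District"]),
   ("state", ["State", "Province"]),
   ("country", ["Country"])]

-- _join_fields(full_address, sources)
def pvJoinFields (d : PySem.Dict String String) (sources : List String) : String :=
  sources.foldl (fun v s => v ++ (if d.contains s then d.getD s "" else "")) ""

def collapse_fields_to_schema_alt (full_address : List (String × String)) : List (String × String) :=
  let d := PySem.Dict.mk full_address
  (pvSchemaSpec.foldl
    (fun out kv => out.insert kv.1 (pvJoinFields d kv.2))
    PySem.Dict.empty).items

-- ===== PRECONDITION & SPEC =====
def Spec_collapse_fields_to_schema (full_address : List (String × String)) (out : List (String × String)) : Prop := out = collapse_fields_to_schema_alt full_address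
instance (full_address : List (String × String)) (out : List (String × String)) : Decidable (Spec_collapse_fields_to_schema full_address out) := by unfold Spec_collapse_fields_to_schema; infer_instance

-- ===== CLAIM (what is proved, stated in full; the proofs are below) =====
def Claim_equal_collapse_fields_to_schema : Prop := ∀ (full_address : List (String × String)), Dom_collapse_fields_to_schema full_address → Spec_collapse_fields_to_schema full_address (collapse_fields_to_schema full_address)

-- ===== LEMMAS AND PROOFS =====

-- A's second loop, characterised: the default-filled dict updated at every key that full_address contains.
lemma pvFoldGetD (keys : List String) (d : PySem.Dict String String)
    (m : PySem.Dict String String) (f : String) :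
    ((keys.foldl (fun m k => if d.contains k then m.insert k (d.getD k "") else m) m).getD f "")
      = if f ∈ keys ∧ d.contains f = true then d.getD f "" else m.getD f "" := by
  induction keys generalizing m with
  | nil => simp
  | cons k ks ih =>
    simp only [List.foldl_cons, ih, List.mem_cons]
    by_cases hk : d.contains k = true
    · by_cases hf : f = k <;> by_cases hm : f ∈ ks <;>
        simp [hf, hm, hk, PySem.Dict.getD_insert]
    · by_cases hf : f = k <;> by_cases hm : f ∈ ks <;> simp_all

lemma pvInit_fold_getD (l : List String) (m : PySem.Dict String String) (f : String) :
    ((l.foldl (fun m k => m.insert k "") m).getD f "")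
      = if f ∈ l then "" else m.getD f "" := by
  induction l generalizing m with
  | nil => simp
  | cons k ks ih =>
    simp only [List.foldl_cons, ih, List.mem_cons]
    by_cases hf : f = k <;> by_cases hm : f ∈ ks <;>
      simp [hf, hm, PySem.Dict.getD_insert]

lemma pvInit_getD (f : String) : pvAllFieldsInit.getD f "" = "" := by
  rw [pvAllFieldsInit, pvInit_fold_getD]
  split_ifs <;> simp

lemma pvAll_getD (d : PySem.Dict String String) (f : String) :
    ((pvAllFieldsInit.keys.foldl
        (fun m k => if d.contains k then m.insert k (d.getD k "") else m) pvAllFieldsInit).getD f "")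
      = if f ∈ pvFieldPool ∧ d.contains f = true then d.getD f "" else "" := by
  rw [pvFoldGetD, show pvAllFieldsInit.keys = pvFieldPool by decide, pvInit_getD]

-- the items of A's insert chain, with the nine assigned values abstracted
lemma pvA_items (v1 v2 v3 v4 v5 v6 v7 v8 v9 : String) :
    ((((((((((PySem.Dict.ofList
      [("apt", ""), ("street1", ""), ("street2", ""), ("postcode", ""), ("district", ""),
       ("city", ""), ("county", ""), ("state", ""), ("country", "")]).insert "apt" v1
     ).insert "street1" v2).insert "street2" v3).insert "postcode" v4).insert "city" v5
     ).insert "district" v6).insert "county" v7).insert "state" v8).insert "country" v9).items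
      = [("apt", v1), ("street1", v2), ("street2", v3), ("postcode", v4), ("district", v6),
         ("city", v5), ("county", v7), ("state", v8), ("country", v9)] := by
  rw [show (PySem.Dict.ofList
      [("apt", ""), ("street1", ""), ("street2", ""), ("postcode", ""), ("district", ""),
       ("city", ""), ("county", ""), ("state", ""), ("country", "")] : PySem.Dict String String)
     = PySem.Dict.mk [("apt", ""), ("street1", ""), ("street2", ""), ("postcode", ""), ("district", ""),
       ("city", ""), ("county", ""), ("state", ""), ("country", "")] from by decide]
  simp only [PySem.Dict.items_insert, PySem.Dict.contains_insert, PySem.Dict.contains_mk]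
  simp

-- the items of B's spec fold, with the per-key joined values abstracted
lemma pvB_items (g : List String → String) :
    (pvSchemaSpec.foldl (fun out kv => out.insert kv.1 (g kv.2)) PySem.Dict.empty).items
      = [("apt", g ["House", "Apt Number"]), ("street1", g ["Street 1", "Block"]),
         ("street2", g ["Building Name", "Building Number", "Floor"]), ("postcode", g ["Postcode"]),
         ("district", g ["District"]), ("city", g ["City", "Post Office Code"]),
         ("county", g ["District"]), ("state", g ["State", "Province"]),
         ("country", g ["Country"])] := by
  simp only [pvSchemaSpec, List.foldl_cons, List.foldl_nil]
  simp only [PySem.Dict.items_insert, PySem.Dict.contains_insert, PySem.Dict.contains_empty,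
    show (PySem.Dict.empty : PySem.Dict String String).items = [] from rfl]
  simp

-- ===== VERDICT (by name: the statement is the Claim_ definition above) =====
theorem collapse_fields_to_schema_spec : Claim_equal_collapse_fields_to_schema := by
  intro fa _
  show _ = collapse_fields_to_schema_alt fa
  simp only [collapse_fields_to_schema, collapse_fields_to_schema_alt, pvAll_getD]
  simp only [pvFieldPool, List.mem_cons, List.not_mem_nil, or_false, true_and, true_or, or_true]
  rw [pvA_items, pvB_items (pvJoinFields (PySem.Dict.mk fa))]
  simp [pvJoinFields, String.empty_append]
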